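-- pv_equiv track=rewrite | github.com/sueszli/vector-database-benchmark | dataset/python-mutated/spanning_tree.py | _find_valid_edges
-- ===== SOURCE A (Python) =====
-- def _find_valid_edges(components, valid_edge_ids):
--     if False:
--         i = 10
--         return i + 15
--     '\n    Find all edges between two components in a complete undirected graph.\n\n    :param components: A [V]-shaped array of boolean component ids. This\n        assumes there are exactly two nonemtpy components.\n    :param valid_edge_ids: An uninitialized array where output is written. On\n        return, the subarray valid_edge_ids[:end] will contain edge ids k for all\n        valid edges.\n    :returns: The number of valid edges found.\n    '
--     k = 0
--     end = 0
--     for (v2, c2) in enumerate(components):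
--         for v1 in range(v2):
--             if c2 ^ components[v1]:
--                 valid_edge_ids[end] = k
--                 end += 1
--             k += 1
--     return end
-- ===== SOURCE B (Python) =====
-- def _find_valid_edges(components, valid_edge_ids):
--     # One O(V) pass with a counter: each new vertex i contributes i - (#previous
--     # vertices in the same component) crossing edges. NOTE: A also writes the edge
--     # ids into valid_edge_ids; B computes only the RETURN value (the count) and
--     # leaves valid_edge_ids untouched -- the equivalence claimed is about the
--     # return value only.
--     counts = {}
--     end = 0
--     for i, c in enumerate(components):
--         end += i - counts.get(c, 0)
--         counts[c] = counts.get(c, 0) + 1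
--     return end
-- ===== Notes on version B (the rewrite author's own statement) =====
-- stated objective: faster
-- what changed: A's nested O(V^2) pair loop (running edge counter k, xor test, writes into valid_edge_ids) is replaced by a single O(V) pass with a per-component counter dict: vertex i adds i minus the number of previously seen vertices of its own component; B returns the same count but does not write the edge ids into valid_edge_ids (return-value equivalence only). (Pre_ excludes the inputs where A raises IndexError because the crossing pairs outnumber len(valid_edge_ids); B would return the count there).
import Mathlib
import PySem

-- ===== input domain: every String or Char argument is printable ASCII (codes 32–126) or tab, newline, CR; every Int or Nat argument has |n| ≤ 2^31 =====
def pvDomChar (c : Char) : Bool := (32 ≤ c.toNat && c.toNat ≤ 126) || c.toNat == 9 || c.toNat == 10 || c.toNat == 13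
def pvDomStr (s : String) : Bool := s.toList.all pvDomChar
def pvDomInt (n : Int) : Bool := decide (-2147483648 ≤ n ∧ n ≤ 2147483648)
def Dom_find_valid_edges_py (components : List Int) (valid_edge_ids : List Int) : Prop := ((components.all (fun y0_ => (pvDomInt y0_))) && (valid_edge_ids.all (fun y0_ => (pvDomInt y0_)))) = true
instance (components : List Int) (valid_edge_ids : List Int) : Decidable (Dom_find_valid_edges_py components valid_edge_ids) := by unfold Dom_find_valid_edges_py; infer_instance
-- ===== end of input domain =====

-- B replaces A's O(V^2) nested pair loop by one O(V) counter pass; A also writes the edge ids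
-- into valid_edge_ids (a mutation B does not perform): the equivalence proved is about the
-- RETURN value only.

-- ===== PORT A =====
-- inner loop body: 'if c2 ^ components[v1]: valid_edge_ids[end]=k; end += 1' then 'k += 1'
-- (state st = (k, end); the write into valid_edge_ids does not affect the return value,
--  and Pre_ excludes the inputs where that write raises IndexError)
def pyA_inner (components : List Int) (c2 : Int) (st : Int × Int) (v1 : Int) : Int × Int :=
  if PySem.Int.bxor c2 (PySem.List.pyGetD components v1 0) ≠ 0 then (st.1 + 1, st.2 + 1)
  else (st.1 + 1, st.2)

-- outer loop body: 'for v1 in range(v2): …' for one (v2, c2) = p from enumerate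
def pyA_outer (components : List Int) (st : Int × Int) (p : Int × Int) : Int × Int :=
  (PySem.List.pyRange 0 p.1 1).foldl (pyA_inner components p.2) st

def find_valid_edges_py (components : List Int) (valid_edge_ids : List Int) : Int :=
  ((PySem.List.enumerate components 0).foldl (pyA_outer components) ((0 : Int), (0 : Int))).2

-- ===== PORT B =====
-- loop body: 'end += i - counts.get(c, 0); counts[c] = counts.get(c, 0) + 1' (state = (end, counts))
def pyB_step (st : Int × PySem.Dict Int Int) (p : Int × Int) : Int × PySem.Dict Int Int :=
  (st.1 + p.1 - st.2.getD p.2 0, st.2.insert p.2 (st.2.getD p.2 0 + 1))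

def find_valid_edges_py_alt (components : List Int) (valid_edge_ids : List Int) : Int :=
  ((PySem.List.enumerate components 0).foldl pyB_step ((0 : Int), PySem.Dict.empty)).1

-- ===== PRECONDITION & SPEC =====
-- number of index pairs i < j with components[i] ≠ components[j] (the crossing-pair count)
def pvCrossCount : List Int → Int
  | [] => 0
  | c :: rest => ((rest.filter (fun x => x ≠ c)).length : Int) + pvCrossCount rest

-- Pre_ excludes exactly the inputs where A raises IndexError: the assignment
-- valid_edge_ids[end] = k fails as soon as the crossing pairs outnumber len(valid_edge_ids).
def Pre_find_valid_edges_py (components : List Int) (valid_edge_ids : List Int) : Prop :=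
  pvCrossCount components ≤ (valid_edge_ids.length : Int)
instance (components : List Int) (valid_edge_ids : List Int) : Decidable (Pre_find_valid_edges_py components valid_edge_ids) := by unfold Pre_find_valid_edges_py; infer_instance

def pvWitness_find_valid_edges_py : List Int × List Int := ([0, 1, 0], [0, 0, 0])

def Spec_find_valid_edges_py (components : List Int) (valid_edge_ids : List Int) (out : Int) : Prop := out = find_valid_edges_py_alt components valid_edge_ids
instance (components : List Int) (valid_edge_ids : List Int) (out : Int) : Decidable (Spec_find_valid_edges_py components valid_edge_ids out) := by unfold Spec_find_valid_edges_py; infer_instance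

-- ===== CLAIM (what is proved, stated in full; the proofs are below) =====
def Claim_equal_find_valid_edges_py : Prop := ∀ (components : List Int) (valid_edge_ids : List Int), Dom_find_valid_edges_py components valid_edge_ids → Pre_find_valid_edges_py components valid_edge_ids → Spec_find_valid_edges_py components valid_edge_ids (find_valid_edges_py components valid_edge_ids)


-- ===== LEMMAS AND PROOFS =====

theorem pv_bxor_eq_zero_iff (a b : Int) : PySem.Int.bxor a b = 0 ↔ a = b := by
  unfold PySem.Int.bxor
  split_ifs with h1 h2 h2 <;>
    [skip; constructor; constructor; skip] <;>
    first
      | (simp only [Int.natCast_eq_zero, Nat.xor_eq_zero_iff]; omega)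
      | (intro h; omega)

theorem pvCross_append (cs : List Int) (c : Int) :
    pvCrossCount (cs ++ [c]) = pvCrossCount cs + ((cs.filter (fun x => x ≠ c)).length : Int) := by
  induction cs with
  | nil => simp [pvCrossCount]
  | cons a cs ih =>
      simp only [List.cons_append, pvCrossCount, List.filter_append, List.filter_cons,
        List.length_append, ih]
      by_cases h : c = a
      · subst h; simp; ring
      · have h' : a ≠ c := fun hh => h hh.symm
        simp [h, h']
        ring

theorem pvA_inner_fold (L : List Int) (c2 : Int) (n : Nat) (hn : n ≤ L.length) (st : Int × Int) :
    (PySem.List.pyRange 0 n 1).foldl (pyA_inner L c2) st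
      = (st.1 + n, st.2 + (((L.take n).filter (fun x => x ≠ c2)).length : Int)) := by
  induction n generalizing st with
  | zero => simp [PySem.List.pyRange_one_eq_nil]
  | succ m ih =>
      have hm : m ≤ L.length := Nat.le_of_succ_le hn
      have hlt : m < L.length := hn
      have hsplit : PySem.List.pyRange 0 ((m : Int) + 1) 1
          = PySem.List.pyRange 0 (m : Int) 1 ++ [(m : Int)] :=
        PySem.List.pyRange_one_succ_right (by positivity)
      have hcast : ((m + 1 : Nat) : Int) = (m : Int) + 1 := by push_cast; ring
      rw [hcast, hsplit, List.foldl_append, ih hm]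
      have hget : PySem.List.pyGetD L (m : Int) 0 = L[m] := by
        rw [PySem.List.pyGetD_natCast]
        exact List.getD_eq_getElem L 0 hlt
      have htake : L.take (m + 1) = L.take m ++ [L[m]] := by
        rw [List.take_add_one]
        simp [List.getElem?_eq_getElem hlt]
      simp only [List.foldl_cons, List.foldl_nil, pyA_inner, hget, htake, List.filter_append,
        List.filter_cons, List.filter_nil, List.length_append]
      by_cases h : L[m] = c2
      · simp [h, Prod.ext_iff]
        all_goals omega
      · have hnz : PySem.Int.bxor c2 L[m] ≠ 0 := fun hq => h ((pv_bxor_eq_zero_iff _ _).1 hq).symm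
        simp [hnz, h, Prod.ext_iff]
        all_goals omega

theorem pvA_eq_cross (cs : List Int) (ids : List Int) :
    find_valid_edges_py cs ids = pvCrossCount cs := by
  unfold find_valid_edges_py
  induction cs using List.reverseRecOn with
  | nil => simp [PySem.List.enumerate, pvCrossCount]
  | append_singleton cs c ih =>
      have hcong : (PySem.List.enumerate cs 0).foldl (pyA_outer (cs ++ [c])) ((0:Int), (0:Int))
          = (PySem.List.enumerate cs 0).foldl (pyA_outer cs) ((0:Int), (0:Int)) := by
        apply PySem.List.foldl_congr_mem
        intro acc p hp
        rcases (PySem.List.mem_enumerate_iff _ _ _).1 hp with ⟨k, hk, rfl⟩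
        unfold pyA_outer
        apply PySem.List.foldl_congr_mem
        intro st v1 hv1
        rcases (PySem.List.mem_pyRange_one).1 hv1 with ⟨h0, hlt⟩
        unfold pyA_inner
        have hv1lt : v1.toNat < cs.length := by omega
        have hga : PySem.List.pyGetD (cs ++ [c]) v1 0 = cs[v1.toNat] := by
          rw [PySem.List.pyGetD_eq_getElem _ _ h0 (by simp; omega)]
          exact List.getElem_append_left hv1lt
        have hgb : PySem.List.pyGetD cs v1 0 = cs[v1.toNat] :=
          PySem.List.pyGetD_eq_getElem _ _ h0 (by omega)
        rw [hga, hgb]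
      rw [PySem.List.enumerate_append, List.foldl_append, hcong]
      set st := (PySem.List.enumerate cs 0).foldl (pyA_outer cs) ((0:Int), (0:Int)) with hst
      simp only [PySem.List.enumerate, List.foldl_cons, List.foldl_nil]
      show (pyA_outer (cs ++ [c]) st (0 + (cs.length : Int), c)).2 = _
      unfold pyA_outer
      simp only [zero_add]
      rw [pvA_inner_fold (cs ++ [c]) c cs.length (by simp) st]
      simp only [List.take_left]
      rw [pvCross_append]
      simp only [ih]

theorem pvB_invariant (cs : List Int) :
    ((PySem.List.enumerate cs 0).foldl pyB_step ((0 : Int), PySem.Dict.empty)).1 = pvCrossCount cs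
    ∧ ∀ v : Int, (((PySem.List.enumerate cs 0).foldl pyB_step ((0 : Int), PySem.Dict.empty)).2).getD v 0
        = (cs.count v : Int) := by
  induction cs using List.reverseRecOn with
  | nil => constructor <;> simp [PySem.List.enumerate, pvCrossCount, PySem.Dict.getD, PySem.Dict.get?, PySem.Dict.empty]
  | append_singleton cs c ih =>
      obtain ⟨ih1, ih2⟩ := ih
      rw [PySem.List.enumerate_append]
      simp only [List.foldl_append, PySem.List.enumerate, List.foldl_cons, List.foldl_nil]
      set st := (PySem.List.enumerate cs 0).foldl pyB_step ((0 : Int), PySem.Dict.empty) with hst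
      constructor
      · show st.1 + (0 + (cs.length : Int)) - st.2.getD c 0 = _
        rw [ih1, ih2 c, pvCross_append]
        have hsplit : cs.length = (cs.filter (fun x => x ≠ c)).length + cs.count c := by
          rw [List.count_eq_length_filter, List.length_eq_length_filter_add (fun x => decide (x ≠ c))]
          congr 2
          apply List.filter_congr
          intro x _
          simp [decide_not]
          rw [Bool.eq_iff_iff]; simp
        omega
      · intro v
        show (st.2.insert c (st.2.getD c 0 + 1)).getD v 0 = _
        by_cases hv : v = c
        · subst hv
          rw [PySem.Dict.getD, PySem.Dict.get?_insert_self, ih2 v]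
          simp [List.count_append]
        · rw [PySem.Dict.getD, PySem.Dict.get?_insert_of_ne _ _ hv, ← PySem.Dict.getD, ih2 v]
          simp [List.count_append, List.count_singleton]
          exact fun h => hv h.symm

-- ===== VERDICT (by name: the statement is the Claim_ definition above) =====
theorem find_valid_edges_py_spec : Claim_equal_find_valid_edges_py := by
  intro components valid_edge_ids _ _
  unfold Spec_find_valid_edges_py find_valid_edges_py_alt
  rw [pvA_eq_cross components valid_edge_ids, (pvB_invariant components).1]
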